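-- pv_equiv track=rewrite | github.com/luisdomarco/AiAgentArchitect | scripts/build-context-roots.py | read_indented_block
-- ===== SOURCE A (Python) =====
-- def read_indented_block(lines: list[str], start: int, base_indent: int) -> tuple[str, int]:
--     """Read a `key: |` block starting from line `start+1`. Return (joined_text, end_index).
--
--     Lines belong to the block if their indent is strictly greater than base_indent
--     or if they are blank. Stops at the first non-blank line with indent <= base_indent.
--     """
--     out: list[str] = []
--     i = start + 1
--     while i < len(lines):
--         line = lines[i].rstrip("\n")
--         stripped = line.lstrip(" ")
--         indent = len(line) - len(stripped)
--         if not stripped: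
--             out.append("")
--             i += 1
--             continue
--         if indent <= base_indent:
--             break
--         out.append(stripped)
--         i += 1
--     return "\n".join(out).rstrip(), i
-- ===== SOURCE B (Python) =====
-- def read_indented_block(lines: list[str], start: int, base_indent: int) -> tuple[str, int]:
--     """Two-phase version: first find the block's end index, then build the text
--     from that slice of indices in a separate comprehension pass."""
--     n = len(lines)
--     end = start + 1
--     while end < n:
--         line = lines[end].rstrip("\n")
--         content = line.lstrip(" ")
--         if content and len(line) - len(content) <= base_indent:
--             break
--         end += 1
--     body = [lines[i].rstrip("\n").lstrip(" ") for i in range(start + 1, end)]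
--     return "\n".join(body).rstrip(), end
-- ===== Notes on version B (the rewrite author's own statement) =====
-- stated objective: alternative
-- what changed: Replaces A's single while loop that accumulates output lines while advancing the index with a two-phase decomposition: a boundary-finding loop that only computes the block's end index, then a separate comprehension over range(start+1, end) that builds the text.
import Mathlib
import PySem

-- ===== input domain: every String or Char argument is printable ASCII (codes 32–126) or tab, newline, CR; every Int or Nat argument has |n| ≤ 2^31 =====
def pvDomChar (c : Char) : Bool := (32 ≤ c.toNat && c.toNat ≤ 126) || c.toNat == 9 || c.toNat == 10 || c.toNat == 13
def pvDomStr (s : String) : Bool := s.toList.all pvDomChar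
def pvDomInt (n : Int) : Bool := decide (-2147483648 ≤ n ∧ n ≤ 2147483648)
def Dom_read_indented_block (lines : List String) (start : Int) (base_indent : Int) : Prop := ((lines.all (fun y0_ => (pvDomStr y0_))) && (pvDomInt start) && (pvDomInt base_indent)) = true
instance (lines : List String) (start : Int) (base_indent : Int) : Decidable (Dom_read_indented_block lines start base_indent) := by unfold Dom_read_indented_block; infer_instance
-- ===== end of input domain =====

-- B's change: one boundary-finding pass computing the end index, then a separate
-- comprehension pass building the text from the index range (objective: alternative decomposition).

-- Shared exact ports of Python's s.rstrip("\n") and s.lstrip(" ") (character-set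
-- one-sided strips are not in PySem; these drop exactly those characters from one side).
def pvRstripNl (s : String) : String := String.ofList ((s.toList.reverse.dropWhile (· == '\n')).reverse)
def pvLstripSp (s : String) : String := String.ofList (s.toList.dropWhile (· == ' '))

-- ===== PORT A =====
-- A's while loop, fuel = number of remaining indices before len(lines)
def pvLoopA (lines : List String) (base_indent : Int) : Nat → Int → List String → List String × Int
  | 0, i, out => (out, i)
  | fuel + 1, i, out =>
    if i < (lines.length : Int) then
      let line := pvRstripNl ((PySem.List.pyGet? lines i).getD "")
      let stripped := pvLstripSp line
      let indent : Int := (line.toList.length : Int) - (stripped.toList.length : Int)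
      if stripped = "" then
        pvLoopA lines base_indent fuel (i + 1) (out ++ [""])
      else if indent ≤ base_indent then
        (out, i)
      else
        pvLoopA lines base_indent fuel (i + 1) (out ++ [stripped])
    else (out, i)

def read_indented_block (lines : List String) (start : Int) (base_indent : Int) : String × Int :=
  let r := pvLoopA lines base_indent ((lines.length : Int) - (start + 1)).toNat (start + 1) []
  (PySem.Str.rstrip (PySem.Str.join "\n" r.1), r.2)

-- ===== PORT B =====
-- phase 1: find the end index of the block
def pvEndB (lines : List String) (base_indent : Int) : Nat → Int → Int
  | 0, i => i
  | fuel + 1, i =>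
    if i < (lines.length : Int) then
      let line := pvRstripNl ((PySem.List.pyGet? lines i).getD "")
      let content := pvLstripSp line
      if content ≠ "" ∧ (line.toList.length : Int) - (content.toList.length : Int) ≤ base_indent then
        i
      else
        pvEndB lines base_indent fuel (i + 1)
    else i

def read_indented_block_alt (lines : List String) (start : Int) (base_indent : Int) : String × Int :=
  let e := pvEndB lines base_indent ((lines.length : Int) - (start + 1)).toNat (start + 1)
  -- phase 2: comprehension over the index range
  let body := (PySem.List.pyRange (start + 1) e 1).map
      (fun i => pvLstripSp (pvRstripNl ((PySem.List.pyGet? lines i).getD "")))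
  (PySem.Str.rstrip (PySem.Str.join "\n" body), e)

-- ===== PRECONDITION & SPEC =====
-- Pre_ excludes exactly the inputs where A raises IndexError: start+1 below -len(lines).
def Pre_read_indented_block (lines : List String) (start : Int) (base_indent : Int) : Prop :=
  -(lines.length : Int) ≤ start + 1
instance (lines : List String) (start : Int) (base_indent : Int) : Decidable (Pre_read_indented_block lines start base_indent) := by unfold Pre_read_indented_block; infer_instance
def pvWitness_read_indented_block : List String × Int × Int := (["k: |", "  a", "  b", "next: 1"], (0, 0))

def Spec_read_indented_block (lines : List String) (start : Int) (base_indent : Int) (out : String × Int) : Prop := out = read_indented_block_alt lines start base_indent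
instance (lines : List String) (start : Int) (base_indent : Int) (out : String × Int) : Decidable (Spec_read_indented_block lines start base_indent out) := by unfold Spec_read_indented_block; infer_instance

-- ===== CLAIM (what is proved, stated in full; the proofs are below) =====
def Claim_equal_read_indented_block : Prop := ∀ (lines : List String) (start : Int) (base_indent : Int), Dom_read_indented_block lines start base_indent → Pre_read_indented_block lines start base_indent → Spec_read_indented_block lines start base_indent (read_indented_block lines start base_indent)

-- ===== LEMMAS AND PROOFS =====

theorem pvEndB_ge (lines : List String) (b : Int) (fuel : Nat) (i : Int) :
    i ≤ pvEndB lines b fuel i := by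
  induction fuel generalizing i with
  | zero => simp [pvEndB]
  | succ fuel ih =>
    simp only [pvEndB]
    split
    · split
      · exact le_refl _
      · exact le_trans (by omega) (ih (i + 1))
    · exact le_refl _

theorem pvLoopA_eq (lines : List String) (b : Int) (fuel : Nat) (i : Int) (out : List String) :
    pvLoopA lines b fuel i out =
      (out ++ (PySem.List.pyRange i (pvEndB lines b fuel i) 1).map
        (fun j => pvLstripSp (pvRstripNl ((PySem.List.pyGet? lines j).getD ""))), pvEndB lines b fuel i) := by
  induction fuel generalizing i out with
  | zero => simp [pvLoopA, pvEndB, PySem.List.pyRange_one_eq_nil]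
  | succ fuel ih =>
    simp only [pvLoopA, pvEndB]
    split_ifs with hi hs hcond hind hcond2 hcond3
    · exact absurd hs hcond.1
    · rw [ih]
      have hlt : i < pvEndB lines b fuel (i + 1) := by
        have := pvEndB_ge lines b fuel (i + 1); omega
      rw [PySem.List.pyRange_one_cons hlt]
      simp [hs]
    · simp [PySem.List.pyRange_one_eq_nil (le_refl i)]
    · exact absurd ⟨hs, hind⟩ hcond2
    · exact absurd hcond3.2 hind
    · rw [ih]
      have hlt : i < pvEndB lines b fuel (i + 1) := by
        have := pvEndB_ge lines b fuel (i + 1); omega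
      rw [PySem.List.pyRange_one_cons hlt]
      simp
    · simp [PySem.List.pyRange_one_eq_nil]

-- ===== VERDICT (by name: the statement is the Claim_ definition above) =====
theorem read_indented_block_spec : Claim_equal_read_indented_block := by
  intro lines start base_indent _ _
  unfold Spec_read_indented_block read_indented_block read_indented_block_alt
  rw [pvLoopA_eq]
  rw [List.nil_append]
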